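-- pv_equiv track=rewrite | github.com/texmaxcode/poker_ml | src/texasholdemgym/backend/poker_core/hand_evaluation.py | hand_rank_5
-- ===== SOURCE A (Python) =====
-- def hand_rank_5(cards5: list[tuple[int, int]]) -> tuple:
--     """Return sortable tuple: (category, tiebreakers…)."""
--     ranks = sorted([r for r, _ in cards5], reverse=True)
--     suits = [s for _, s in cards5]
--     counts = {r: ranks.count(r) for r in set(ranks)}
--     by_count = sorted(counts.items(), key=lambda kv: (kv[1], kv[0]), reverse=True)
--     is_flush = len(set(suits)) == 1
--     uniq = sorted(set(ranks), reverse=True)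
--     is_straight = len(uniq) == 5 and (uniq[0] - uniq[4] == 4)
--     # Wheel A-5
--     if set(ranks) == {14, 5, 4, 3, 2}:
--         is_straight = True
--         uniq = [5, 4, 3, 2, 1]
--
--     if is_straight and is_flush:
--         return (8, uniq[0])
--     if by_count[0][1] == 4:
--         four = by_count[0][0]
--         kicker = max(r for r in ranks if r != four)
--         return (7, four, kicker)
--     if by_count[0][1] == 3 and by_count[1][1] == 2:
--         return (6, by_count[0][0], by_count[1][0])
--     if is_flush:
--         return (5, *ranks)
--     if is_straight:
--         return (4, uniq[0])
--     if by_count[0][1] == 3: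
--         trip = by_count[0][0]
--         kickers = sorted([r for r in ranks if r != trip], reverse=True)
--         return (3, trip, *kickers)
--     if by_count[0][1] == 2 and by_count[1][1] == 2:
--         p1, p2 = by_count[0][0], by_count[1][0]
--         kicker = max(r for r in ranks if r not in (p1, p2))
--         hi, lo = max(p1, p2), min(p1, p2)
--         return (2, hi, lo, kicker)
--     if by_count[0][1] == 2:
--         pair = by_count[0][0]
--         kickers = sorted([r for r in ranks if r != pair], reverse=True)
--         return (1, pair, *kickers)
--     return (0, *ranks)
-- ===== SOURCE B (Python) =====
-- def _runs(rs):
--     """Run-length encode rs (adjacent equal values) into (count, value) pairs, recursively."""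
--     if not rs:
--         return []
--     rest = _runs(rs[1:])
--     if rest and rest[0][1] == rs[0]:
--         return [(rest[0][0] + 1, rs[0])] + rest[1:]
--     return [(1, rs[0])] + rest
--
--
-- def hand_rank_5(cards5: list[tuple[int, int]]) -> tuple:
--     """Return sortable tuple: (category, tiebreakers...)."""
--     rs = sorted((r for r, _ in cards5), reverse=True)
--     runs = _runs(rs)                     # one (count, rank) pair per distinct rank, rank-descending
--     uniq = [r for _, r in runs]          # the distinct ranks, descending
--     groups = sorted(runs, reverse=True)  # biggest group first, rank breaks ties
--     flush = len(cards5) > 0 and all(s == cards5[0][1] for _, s in cards5)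
--     wheel = uniq == [14, 5, 4, 3, 2]
--     straight = wheel or (len(uniq) == 5 and uniq[0] - uniq[4] == 4)
--     high = 5 if wheel else uniq[0]
--     if straight and flush:
--         return (8, high)
--     c0, r0 = groups[0]
--     if c0 == 4:
--         return (7, r0, max(r for _, r in groups[1:]))
--     if c0 == 3 and groups[1][0] == 2:
--         return (6, r0, groups[1][1])
--     if flush:
--         return (5, *rs)
--     if straight:
--         return (4, high)
--     if c0 == 3:
--         return (3, r0, *[r for r in rs if r != r0])
--     if c0 == 2 and groups[1][0] == 2:
--         return (2, r0, groups[1][1], max(r for _, r in groups[2:]))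
--     if c0 == 2:
--         return (1, r0, *[r for r in rs if r != r0])
--     return (0, *rs)
-- ===== Notes on version B (the rewrite author's own statement) =====
-- stated objective: alternative
-- what changed: Replaces A's dict-of-counts built by per-rank ranks.count scans plus per-branch kicker recomputation (max()/re-sorting/hi-lo comparison, mutated uniq) with a recursive run-length encoding of the descending-sorted ranks: the (count, rank) runs give the distinct ranks, the straight/wheel tests, and after one plain tuple sort the group order, so kickers for quads and two pair are read off the remaining groups instead of re-scanning the rank list.
import Mathlib
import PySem

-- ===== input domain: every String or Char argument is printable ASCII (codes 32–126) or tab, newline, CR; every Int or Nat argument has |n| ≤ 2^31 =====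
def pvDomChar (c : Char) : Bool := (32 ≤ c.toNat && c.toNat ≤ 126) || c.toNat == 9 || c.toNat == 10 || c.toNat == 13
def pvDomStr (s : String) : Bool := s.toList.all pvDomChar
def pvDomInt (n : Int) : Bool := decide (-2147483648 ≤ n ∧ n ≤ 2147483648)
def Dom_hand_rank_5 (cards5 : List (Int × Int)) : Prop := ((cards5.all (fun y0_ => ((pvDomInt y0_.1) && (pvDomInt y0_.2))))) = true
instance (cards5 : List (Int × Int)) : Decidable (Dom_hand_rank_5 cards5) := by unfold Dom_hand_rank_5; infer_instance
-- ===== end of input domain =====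

-- B evaluates the hand from a recursive run-length encoding of the sorted ranks instead of A's
-- counts dict, reading quad/two-pair kickers off the remaining groups (objective: alternative).

-- ===== PORT A =====
-- everything of A after `ranks`/`suits` depends only on the sorted rank list and the flush flag
def handA_core (ranks : List Int) (is_flush : Bool) : List Int :=
  let counts := (PySem.Set.ofList ranks).foldl
    (fun d r => d.insert r ((PySem.List.count ranks r : Int))) PySem.Dict.empty
  let by_count := PySem.List.sorted2 counts.items (fun kv => kv.2) (fun kv => kv.1) true
  let uniq0 := PySem.List.sorted (PySem.Set.ofList ranks) (fun x => x) true
  let is_straight0 := uniq0.length == 5 &&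
    (PySem.List.pyGetD uniq0 0 0 - PySem.List.pyGetD uniq0 4 0 == 4)
  let wheel := PySem.Set.equal (PySem.Set.ofList ranks) (PySem.Set.ofList [14, 5, 4, 3, 2])
  let is_straight := if wheel then true else is_straight0
  let uniq := if wheel then [5, 4, 3, 2, 1] else uniq0
  let bc0 := PySem.List.pyGetD by_count 0 (0, 0)     -- by_count[0]; [] is outside Pre_
  if is_straight && is_flush then [8, PySem.List.pyGetD uniq 0 0]
  else if bc0.2 == 4 then
    let four := bc0.1
    let kicker := (PySem.List.max? (ranks.filter (fun r => !(r == four))) (fun x => x)).getD 0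
    [7, four, kicker]
  else if bc0.2 == 3 && (PySem.List.pyGetD by_count 1 (0, 0)).2 == 2 then
    [6, bc0.1, (PySem.List.pyGetD by_count 1 (0, 0)).1]
  else if is_flush then 5 :: ranks
  else if is_straight then [4, PySem.List.pyGetD uniq 0 0]
  else if bc0.2 == 3 then
    let trip := bc0.1
    let kickers := PySem.List.sorted (ranks.filter (fun r => !(r == trip))) (fun x => x) true
    3 :: trip :: kickers
  else if bc0.2 == 2 && (PySem.List.pyGetD by_count 1 (0, 0)).2 == 2 then
    let p1 := bc0.1
    let p2 := (PySem.List.pyGetD by_count 1 (0, 0)).1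
    let kicker := (PySem.List.max? (ranks.filter (fun r => !(r == p1 || r == p2))) (fun x => x)).getD 0
    [2, max p1 p2, min p1 p2, kicker]
  else if bc0.2 == 2 then
    let pair := bc0.1
    let kickers := PySem.List.sorted (ranks.filter (fun r => !(r == pair))) (fun x => x) true
    1 :: pair :: kickers
  else 0 :: ranks

def hand_rank_5 (cards5 : List (Int × Int)) : List Int :=
  handA_core (PySem.List.sorted (cards5.map (fun c => c.1)) (fun x => x) true)
    (PySem.Set.len (PySem.Set.ofList (cards5.map (fun c => c.2))) == 1)

-- ===== PORT B =====
-- B's _runs helper: recursive run-length encoding into (count, value) pairs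
def runsB : List Int → List (Int × Int)
  | [] => []
  | r :: rest =>
    match runsB rest with
    | [] => [(1, r)]
    | (c, r') :: t => if r' == r then (c + 1, r) :: t else (1, r) :: (c, r') :: t

-- everything of B after `rs`/`flush` depends only on the sorted rank list and the flush flag
def handB_core (rs : List Int) (flush : Bool) : List Int :=
  let runs := runsB rs
  let uniq := runs.map (fun p => p.2)
  let groups := PySem.List.sorted2 runs (fun p => p.1) (fun p => p.2) true
  let wheel := uniq == [14, 5, 4, 3, 2]
  let straight := wheel ||
    (uniq.length == 5 && (PySem.List.pyGetD uniq 0 0 - PySem.List.pyGetD uniq 4 0 == 4))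
  let high := if wheel then (5 : Int) else PySem.List.pyGetD uniq 0 0   -- uniq[0]; [] outside Pre_
  if straight && flush then [8, high]
  else
    let g0 := PySem.List.pyGetD groups 0 ((0 : Int), (0 : Int))         -- groups[0]; [] outside Pre_
    -- the max(...) over an empty groups[1:] / groups[2:] raises only outside Pre_; getD 0 there
    if g0.1 == 4 then
      [7, g0.2,
        (PySem.List.max? ((PySem.List.slice groups (some 1) none).map (fun p => p.2))
          (fun x => x)).getD 0]
    else if g0.1 == 3 && (PySem.List.pyGetD groups 1 ((0 : Int), (0 : Int))).1 == 2 then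
      [6, g0.2, (PySem.List.pyGetD groups 1 ((0 : Int), (0 : Int))).2]
    else if flush then 5 :: rs
    else if straight then [4, high]
    else if g0.1 == 3 then 3 :: g0.2 :: rs.filter (fun r => !(r == g0.2))
    else if g0.1 == 2 && (PySem.List.pyGetD groups 1 ((0 : Int), (0 : Int))).1 == 2 then
      [2, g0.2, (PySem.List.pyGetD groups 1 ((0 : Int), (0 : Int))).2,
        (PySem.List.max? ((PySem.List.slice groups (some 2) none).map (fun p => p.2))
          (fun x => x)).getD 0]
    else if g0.1 == 2 then 1 :: g0.2 :: rs.filter (fun r => !(r == g0.2))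
    else 0 :: rs

def hand_rank_5_alt (cards5 : List (Int × Int)) : List Int :=
  handB_core (PySem.List.sorted (cards5.map (fun c => c.1)) (fun x => x) true)
    (decide (0 < cards5.length) &&
      cards5.all (fun c => c.2 == (PySem.List.pyGetD cards5 0 ((0 : Int), (0 : Int))).2))

-- ===== PRECONDITION & SPEC =====
def pvAllEq (xs : List Int) : Bool := xs.all (fun x => xs.all (fun y => x == y))

-- Pre_ = exactly the inputs on which A returns: A raises IndexError/ValueError on the empty
-- hand, on 2 equal-rank cards of unequal suits, on 3 or 4 cards of one rank, and on 4 cards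
-- forming two pairs without being a flush.
def Pre_hand_rank_5 (cards5 : List (Int × Int)) : Prop :=
  cards5 ≠ [] ∧
  ¬(cards5.length = 2 ∧ pvAllEq (cards5.map (fun c => c.1)) = true ∧
      ¬ pvAllEq (cards5.map (fun c => c.2)) = true) ∧
  ¬(cards5.length = 3 ∧ pvAllEq (cards5.map (fun c => c.1)) = true) ∧
  ¬(cards5.length = 4 ∧ pvAllEq (cards5.map (fun c => c.1)) = true) ∧
  ¬(cards5.length = 4 ∧ (PySem.Set.ofList (cards5.map (fun c => c.1))).length = 2 ∧
      (∀ r ∈ cards5.map (fun c => c.1), List.count r (cards5.map (fun c => c.1)) = 2) ∧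
      ¬ pvAllEq (cards5.map (fun c => c.2)) = true)
instance (cards5 : List (Int × Int)) : Decidable (Pre_hand_rank_5 cards5) := by
  unfold Pre_hand_rank_5; infer_instance
def pvWitness_hand_rank_5 : (List (Int × Int)) := [(14, 0), (13, 0), (12, 1), (11, 2), (9, 3)]

def Spec_hand_rank_5 (cards5 : List (Int × Int)) (out : List Int) : Prop := out = hand_rank_5_alt cards5
instance (cards5 : List (Int × Int)) (out : List Int) : Decidable (Spec_hand_rank_5 cards5 out) := by
  unfold Spec_hand_rank_5; infer_instance

-- ===== CLAIM (what is proved, stated in full; the proofs are below) =====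
def Claim_equal_hand_rank_5 : Prop := ∀ (cards5 : List (Int × Int)), Dom_hand_rank_5 cards5 → Pre_hand_rank_5 cards5 → Spec_hand_rank_5 cards5 (hand_rank_5 cards5)

-- ===== LEMMAS AND PROOFS =====

theorem runsB_head (r : Int) (rest : List Int) :
    ∃ c t, runsB (r :: rest) = (c, r) :: t := by
  rw [runsB]
  match h : runsB rest with
  | [] => exact ⟨1, [], rfl⟩
  | (c, r') :: t =>
    by_cases hrr : (r' == r) = true
    · simp only [hrr, if_true]
      have : r' = r := by simpa using hrr
      subst this
      exact ⟨c + 1, t, rfl⟩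
    · have hfalse : (r' == r) = false := by simpa using hrr
      simp only [hfalse, Bool.false_eq_true, if_false]
      exact ⟨1, (c, r') :: t, rfl⟩

theorem runsB_char : ∀ (rs : List Int), rs.Pairwise (fun a b : Int => b ≤ a) →
    ((runsB rs).map Prod.snd).Pairwise (fun a b : Int => b < a) ∧
    (∀ k : Int, k ∈ (runsB rs).map Prod.snd ↔ k ∈ rs) ∧
    (∀ p ∈ runsB rs, p.1 = (List.count p.2 rs : Int))
  | [], _ => by simp [runsB]
  | r :: rest, hpw => by
    obtain ⟨hr, hrest⟩ := List.pairwise_cons.mp hpw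
    obtain ⟨hpw', hmem', hcnt'⟩ := runsB_char rest hrest
    rw [runsB]
    match h : runsB rest with
    | [] =>
      have hre : rest = [] := by
        cases rest with
        | nil => rfl
        | cons x xs => obtain ⟨c, t, ht⟩ := runsB_head x xs; rw [ht] at h; cases h
      subst hre
      simp [List.count_cons]
    | (c, r') :: t =>
      rw [h] at hpw' hmem' hcnt'
      have hr'rest : r' ∈ rest := (hmem' r').mp (by simp)
      simp only [List.map_cons] at hpw' hmem'
      by_cases hrr : (r' == r) = true
      · have he : r' = r := by simpa using hrr
        subst he
        simp only [hrr, if_true, List.map_cons]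
        refine ⟨hpw', ?_, ?_⟩
        · intro k
          have h1 := hmem' k
          simp only [List.mem_cons] at h1 ⊢
          constructor
          · rintro (rfl | hk)
            · exact Or.inr hr'rest
            · exact Or.inr (h1.mp (Or.inr hk))
          · rintro (rfl | hk)
            · exact Or.inl rfl
            · exact h1.mpr hk
        · intro p hp
          rcases List.mem_cons.mp hp with rfl | hp'
          · have hc : c = (List.count r' rest : Int) := hcnt' (c, r') (by simp)
            simp only [List.count_cons_self]
            push_cast
            omega
          · have hc := hcnt' p (List.mem_cons_of_mem _ hp')
            have hne : p.2 ≠ r' := by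
              have hlt := (List.pairwise_cons.mp hpw').1 p.2 (List.mem_map_of_mem hp')
              omega
            rw [hc]
            simp [Ne.symm hne]
      · have hrne : r' ≠ r := by simpa using hrr
        have hnotin : r ∉ rest := by
          intro hin
          have : r ∈ r' :: t.map Prod.snd := (hmem' r).mpr hin
          rcases List.mem_cons.mp this with he | ht'
          · exact hrne he.symm
          · have h1 : r < r' := (List.pairwise_cons.mp hpw').1 r ht'
            have h2 : r' ≤ r := hr r' hr'rest
            omega
        have hfalse : (r' == r) = false := by simpa using hrr
        simp only [hfalse, Bool.false_eq_true, if_false, List.map_cons]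
        refine ⟨?_, ?_, ?_⟩
        · refine List.pairwise_cons.mpr ⟨?_, hpw'⟩
          intro y hy
          have hyrest : y ∈ rest := (hmem' y).mp hy
          have hne : y ≠ r := fun he => hnotin (he ▸ hyrest)
          have := hr y hyrest
          omega
        · intro k
          have h1 := hmem' k
          simp only [List.mem_cons] at h1 ⊢
          tauto
        · intro p hp
          rcases List.mem_cons.mp hp with rfl | hp'
          · simp only [List.count_cons_self]
            rw [List.count_eq_zero_of_not_mem hnotin]
            simp
          · have hc := hcnt' p hp'
            have hpmem : p.2 ∈ rest := (hmem' p.2).mp (by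
              rcases List.mem_cons.mp hp' with rfl | hpt
              · simp
              · exact List.mem_cons_of_mem _ (List.mem_map_of_mem hpt))
            have hne : p.2 ≠ r := fun he => hnotin (he ▸ hpmem)
            rw [hc]
            simp [Ne.symm hne]

theorem fold_insert_items (f : Int → Int) : ∀ (ks : List Int) (d : PySem.Dict Int Int),
    ks.Nodup → (∀ k ∈ ks, d.contains k = false) →
    (ks.foldl (fun d k => d.insert k (f k)) d).items = d.items ++ ks.map (fun k => (k, f k))
  | [], d, _, _ => by simp
  | k :: ks, d, hnd, hc => by
    simp only [List.foldl_cons, List.map_cons]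
    rw [fold_insert_items f ks (d.insert k (f k)) hnd.of_cons]
    · rw [PySem.Dict.items_insert_of_not_contains d (f k) (hc k (by simp))]
      simp
    · intro k' hk'
      rw [PySem.Dict.contains_insert]
      simp only [Bool.or_eq_false_iff]
      constructor
      · simp only [beq_eq_false_iff_ne, ne_eq]
        exact fun h => (List.nodup_cons.mp hnd).1 (h ▸ hk')
      · exact hc k' (List.mem_cons_of_mem _ hk')

-- A's counts dict: its items are the distinct ranks with their counts
theorem itemsA_eq (rs : List Int) :
    ((PySem.Set.ofList rs).foldl
      (fun d r => d.insert r ((PySem.List.count rs r : Int))) PySem.Dict.empty).items =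
    (PySem.Set.ofList rs).map (fun k => (k, (List.count k rs : Int))) := by
  rw [fold_insert_items (fun k => ((PySem.List.count rs k : Int))) (PySem.Set.ofList rs)
    PySem.Dict.empty (PySem.Set.nodup_ofList rs) (fun k _ => PySem.Dict.contains_empty k)]
  simp [PySem.List.count_eq, PySem.Dict.empty]

-- B's runs are a permutation of A's (rank, count) items with the components swapped
theorem runs_perm_items_swap (rs : List Int) (hpw : rs.Pairwise (fun a b : Int => b ≤ a)) :
    (runsB rs).Perm
      (((PySem.Set.ofList rs).map (fun k => (k, (List.count k rs : Int)))).map Prod.swap) := by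
  obtain ⟨hpw', hmem', hcnt'⟩ := runsB_char rs hpw
  have h1 : runsB rs = ((runsB rs).map Prod.snd).map (fun k => ((List.count k rs : Int), k)) := by
    rw [List.map_map]
    conv_lhs => rw [← List.map_id (runsB rs)]
    exact List.map_congr_left fun p hp => by
      have := hcnt' p hp
      simp [Function.comp, ← this]
  have hperm : ((runsB rs).map Prod.snd).Perm (PySem.Set.ofList rs) := by
    have hnd : ((runsB rs).map Prod.snd).Nodup :=
      List.Pairwise.imp (fun h => by omega) hpw'
    refine (List.perm_ext_iff_of_nodup hnd (PySem.Set.nodup_ofList rs)).mpr ?_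
    intro a
    rw [hmem' a, PySem.Set.mem_ofList]
  rw [h1, List.map_map, List.map_map]
  have hfe : (Prod.swap ∘ fun k : Int => (k, (List.count k rs : Int))) =
      (fun k : Int => ((List.count k rs : Int), k)) := rfl
  rw [hfe, ← List.map_map]
  exact hperm.map _

-- the two sort comparators: "a strictly before b" under key (count, rank), resp. A's (kv.2, kv.1)
def lexCR (a b : Int × Int) : Bool :=
  decide (a.1 < b.1) || (!decide (b.1 < a.1) && decide (a.2 < b.2))

def lexRC (a b : Int × Int) : Bool :=
  decide (a.2 < b.2) || (!decide (b.2 < a.2) && decide (a.1 < b.1))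

theorem insertBy_pairwise_cmp (cmp : Int × Int → Int × Int → Bool)
    (hasymm : ∀ a b, cmp a b = true → cmp b a = false)
    (htrans : ∀ a b c, cmp a b = true → cmp b c = true → cmp a c = true)
    (x : Int × Int) : ∀ (ys : List (Int × Int)),
    ys.Pairwise (fun a b => cmp a b = false) →
    (PySem.List.insertBy (fun a b => cmp b a) x ys).Pairwise (fun a b => cmp a b = false)
  | [], _ => by simp [PySem.List.insertBy]
  | y :: ys, h => by
    rw [PySem.List.insertBy]
    obtain ⟨hy, hys⟩ := List.pairwise_cons.mp h
    by_cases hxy : cmp y x = true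
    · rw [if_pos hxy]
      refine List.pairwise_cons.mpr ⟨?_, h⟩
      intro z hz
      rcases List.mem_cons.mp hz with rfl | hz'
      · exact hasymm _ _ hxy
      · rcases hlx : cmp x z with _ | _
        · rfl
        · exact absurd (htrans _ _ _ hxy hlx) (by simp [hy z hz'])
    · rw [if_neg hxy]
      refine List.pairwise_cons.mpr
        ⟨?_, insertBy_pairwise_cmp cmp hasymm htrans x ys hys⟩
      intro w hw
      rcases (PySem.List.mem_insertBy _ _ _ _).mp hw with rfl | hw'
      · exact Bool.eq_false_iff.mpr hxy
      · exact hy w hw'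

theorem foldl_insertBy_pairwise_cmp (cmp : Int × Int → Int × Int → Bool)
    (hasymm : ∀ a b, cmp a b = true → cmp b a = false)
    (htrans : ∀ a b c, cmp a b = true → cmp b c = true → cmp a c = true) :
    ∀ (xs acc : List (Int × Int)),
    acc.Pairwise (fun a b => cmp a b = false) →
    (xs.foldl (fun acc x => PySem.List.insertBy (fun a b => cmp b a) x acc) acc).Pairwise
      (fun a b => cmp a b = false)
  | [], acc, h => h
  | x :: xs, acc, h => by
    rw [List.foldl_cons]
    exact foldl_insertBy_pairwise_cmp cmp hasymm htrans xs _
      (insertBy_pairwise_cmp cmp hasymm htrans x acc h)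

theorem bycount_pairwise (xs : List (Int × Int)) :
    (PySem.List.sorted2 xs (fun kv => kv.2) (fun kv => kv.1) true).Pairwise
      (fun a b => lexRC a b = false) :=
  foldl_insertBy_pairwise_cmp lexRC
    (fun a b h => by simp [lexRC] at h ⊢; omega)
    (fun a b c h1 h2 => by simp [lexRC] at h1 h2 ⊢; omega)
    xs [] List.Pairwise.nil

theorem groups_pairwise (xs : List (Int × Int)) :
    (PySem.List.sorted2 xs (fun p => p.1) (fun p => p.2) true).Pairwise
      (fun a b => lexCR a b = false) :=
  foldl_insertBy_pairwise_cmp lexCR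
    (fun a b h => by simp [lexCR] at h ⊢; omega)
    (fun a b c h1 h2 => by simp [lexCR] at h1 h2 ⊢; omega)
    xs [] List.Pairwise.nil

-- B's sorted groups are A's by_count with the pair components swapped
theorem groups_eq_bycount_swap (rs : List Int) (hpw : rs.Pairwise (fun a b : Int => b ≤ a)) :
    PySem.List.sorted2 (runsB rs) (fun p => p.1) (fun p => p.2) true =
    (PySem.List.sorted2 ((PySem.Set.ofList rs).map (fun k => (k, (List.count k rs : Int))))
      (fun kv => kv.2) (fun kv => kv.1) true).map Prod.swap := by
  apply List.Perm.eq_of_pairwise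
    (le := fun a b => lexCR a b = false)
  · intro a b _ _ h1 h2
    simp only [lexCR, Bool.or_eq_false_iff, Bool.and_eq_false_iff] at h1 h2
    simp only [decide_eq_false_iff_not, Bool.not_eq_false', decide_eq_true_iff] at h1 h2
    have : a.1 = b.1 ∧ a.2 = b.2 := by omega
    exact Prod.ext this.1 this.2
  · exact groups_pairwise _
  · exact List.pairwise_map.mpr ((bycount_pairwise _).imp (fun h => h))
  · exact ((PySem.List.sorted2_perm _ _ _ _).trans (runs_perm_items_swap rs hpw)).trans
      (((PySem.List.sorted2_perm ((PySem.Set.ofList rs).map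
        (fun k => (k, (List.count k rs : Int)))) (fun kv => kv.2) (fun kv => kv.1)
        true).symm).map Prod.swap)

theorem snd_runs_perm (rs : List Int) (hpw : rs.Pairwise (fun a b : Int => b ≤ a)) :
    ((runsB rs).map Prod.snd).Perm (PySem.Set.ofList rs) := by
  obtain ⟨hpw', hmem', _⟩ := runsB_char rs hpw
  have hnd : ((runsB rs).map Prod.snd).Nodup :=
    List.Pairwise.imp (fun h => by omega) hpw'
  refine (List.perm_ext_iff_of_nodup hnd (PySem.Set.nodup_ofList rs)).mpr ?_
  intro a
  rw [hmem' a, PySem.Set.mem_ofList]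

-- A's uniq (sorted distinct ranks, descending) is B's list of run values
theorem uniq_eq (rs : List Int) (hpw : rs.Pairwise (fun a b : Int => b ≤ a)) :
    PySem.List.sorted (PySem.Set.ofList rs) (fun x => x) true = (runsB rs).map Prod.snd := by
  apply List.Perm.eq_of_pairwise (le := fun a b : Int => b ≤ a)
  · intro a b _ _ h1 h2; omega
  · exact PySem.List.sorted_pairwise_rev _ _
  · exact ((runsB_char rs hpw).1).imp (fun h => by omega)
  · exact (PySem.List.sorted_perm _ _ _).trans (snd_runs_perm rs hpw).symm

-- A's set-equality wheel test is B's comparison of the run values with [14, 5, 4, 3, 2]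
theorem wheel_eq (rs : List Int) (hpw : rs.Pairwise (fun a b : Int => b ≤ a)) :
    PySem.Set.equal (PySem.Set.ofList rs) (PySem.Set.ofList [14, 5, 4, 3, 2]) =
    ((runsB rs).map Prod.snd == [14, 5, 4, 3, 2]) := by
  have hof : PySem.Set.ofList [(14 : Int), 5, 4, 3, 2] = [14, 5, 4, 3, 2] := by decide
  obtain ⟨hpw', hmem', _⟩ := runsB_char rs hpw
  have hperm := snd_runs_perm rs hpw
  rw [Bool.eq_iff_iff, beq_iff_eq, PySem.Set.equal, hof, Bool.and_eq_true,
    PySem.Set.issubset_iff, PySem.Set.issubset_iff]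
  constructor
  · rintro ⟨h1, h2⟩
    apply List.Perm.eq_of_pairwise (le := fun a b : Int => b ≤ a)
    · intro a b _ _ ha hb; omega
    · exact hpw'.imp (fun h => by omega)
    · decide
    · refine hperm.trans ((List.perm_ext_iff_of_nodup (PySem.Set.nodup_ofList rs)
        (by decide)).mpr ?_)
      intro a
      exact ⟨h1 a, h2 a⟩
  · intro h
    have hp2 : (PySem.Set.ofList rs).Perm [(14 : Int), 5, 4, 3, 2] :=
      hperm.symm.trans (by rw [h])
    constructor
    · intro x hx
      have := hp2.mem_iff.mp hx
      simpa using this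
    · intro x hx
      apply hp2.mem_iff.mpr
      simpa using hx

-- max(xs) == max(ys) as soon as xs and ys hold the same values
theorem max_getD_congr (xs ys : List Int) (h : ∀ x : Int, x ∈ xs ↔ x ∈ ys) :
    (PySem.List.max? xs (fun x => x)).getD 0 = (PySem.List.max? ys (fun x => x)).getD 0 := by
  match hx : PySem.List.max? xs (fun x => x), hy : PySem.List.max? ys (fun x => x) with
  | none, none => rfl
  | none, some m =>
    have hxs : xs = [] := (PySem.List.max?_eq_none_iff _ _).mp hx
    have : m ∈ xs := (h m).mpr (PySem.List.max?_mem hy)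
    rw [hxs] at this
    cases this
  | some m, none =>
    have hys : ys = [] := (PySem.List.max?_eq_none_iff _ _).mp hy
    have : m ∈ ys := (h m).mp (PySem.List.max?_mem hx)
    rw [hys] at this
    cases this
  | some m, some m' =>
    simp only [Option.getD_some]
    have h1 : m ≤ m' := PySem.List.max?_isMax hy m ((h m).mp (PySem.List.max?_mem hx))
    have h2 : m' ≤ m := PySem.List.max?_isMax hx m' ((h m').mpr (PySem.List.max?_mem hy))
    omega

-- keys of by_count are the distinct ranks (no duplicates)
theorem bycount_keys_perm (rs : List Int) :
    ((PySem.List.sorted2 ((PySem.Set.ofList rs).map (fun k => (k, (List.count k rs : Int))))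
      (fun kv => kv.2) (fun kv => kv.1) true).map Prod.fst).Perm (PySem.Set.ofList rs) := by
  have h1 := (PySem.List.sorted2_perm ((PySem.Set.ofList rs).map
    (fun k => (k, (List.count k rs : Int)))) (fun kv => kv.2) (fun kv => kv.1) true).map Prod.fst
  rw [List.map_map] at h1
  have hfe : (Prod.fst ∘ fun k : Int => (k, (List.count k rs : Int))) = id := rfl
  rw [hfe, List.map_id] at h1
  exact h1

theorem pyGetD_wheel_ite (w : Bool) (u : List Int) :
    PySem.List.pyGetD (if w = true then [5, 4, 3, 2, 1] else u) 0 0 =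
    (if w = true then (5 : Int) else PySem.List.pyGetD u 0 0) := by
  cases w
  · simp
  · simp [PySem.List.pyGetD_zero_cons]

theorem if_true_or (w s : Bool) : (if w = true then true else s) = (w || s) := by
  cases w <;> simp

theorem core_eq (rs : List Int) (f : Bool) (hpw : rs.Pairwise (fun a b : Int => b ≤ a)) :
    handA_core rs f = handB_core rs f := by
  have hsnd : (fun p : Int × Int => p.2) = Prod.snd := rfl
  simp only [handA_core, handB_core, hsnd]
  rw [itemsA_eq, groups_eq_bycount_swap rs hpw, uniq_eq rs hpw, wheel_eq rs hpw]
  set u := (runsB rs).map Prod.snd with hu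
  set w := (u == [14, 5, 4, 3, 2]) with hw
  set bc := PySem.List.sorted2 ((PySem.Set.ofList rs).map
    (fun k => (k, (List.count k rs : Int)))) (fun kv => kv.2) (fun kv => kv.1) true with hbc
  have e0 : PySem.List.pyGetD (bc.map Prod.swap) 0 ((0 : Int), (0 : Int)) =
      Prod.swap (PySem.List.pyGetD bc 0 ((0 : Int), (0 : Int))) := by
    simpa using PySem.List.pyGetD_map Prod.swap bc 0 ((0 : Int), (0 : Int))
  have e1 : PySem.List.pyGetD (bc.map Prod.swap) 1 ((0 : Int), (0 : Int)) =
      Prod.swap (PySem.List.pyGetD bc 1 ((0 : Int), (0 : Int))) := by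
    simpa using PySem.List.pyGetD_map Prod.swap bc 1 ((0 : Int), (0 : Int))
  have hss : ∀ (l : List (Int × Int)), (l.map Prod.swap).map Prod.snd = l.map Prod.fst :=
    fun l => by rw [List.map_map]; rfl
  have hsl1 : PySem.List.slice (bc.map Prod.swap) (some 1) none = (bc.drop 1).map Prod.swap := by
    rw [PySem.List.slice_from _ (by norm_num : (0 : Int) ≤ 1), ← List.map_drop]
    rfl
  have hsl2 : PySem.List.slice (bc.map Prod.swap) (some 2) none = (bc.drop 2).map Prod.swap := by
    rw [PySem.List.slice_from _ (by norm_num : (0 : Int) ≤ 2), ← List.map_drop]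
    rfl
  have hkeys : (bc.map Prod.fst).Perm (PySem.Set.ofList rs) := bycount_keys_perm rs
  have hknd : (bc.map Prod.fst).Nodup := hkeys.nodup_iff.mpr (PySem.Set.nodup_ofList rs)
  have hkmem : ∀ x : Int, x ∈ bc.map Prod.fst ↔ x ∈ rs := fun x =>
    (hkeys.mem_iff).trans (PySem.Set.mem_ofList rs x)
  have hsrt : ∀ p : Int → Bool,
      PySem.List.sorted (rs.filter p) (fun x => x) true = rs.filter p :=
    fun p => PySem.List.sorted_rev_eq_self_of_pairwise _ _ (hpw.filter p)
  rw [e0, e1, hsl1, hsl2, hss, hss, pyGetD_wheel_ite, if_true_or, hsrt]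
  simp only [Prod.fst_swap, Prod.snd_swap]
  split_ifs with h1 h2 h3 h4 h5 h6 h7 h8 h9 h10 <;> try rfl
  · -- four of a kind: the kickers agree
    match hbcc : bc with
    | [] =>
      simp [PySem.List.pyGetD, PySem.List.pyGet?] at h3
    | b0 :: t =>
      rw [PySem.List.pyGetD_zero_cons]
      simp only [List.map_cons, List.nodup_cons] at hknd
      simp only [List.cons.injEq, and_true, true_and]
      apply max_getD_congr
      intro x
      simp only [List.mem_filter, List.drop_one, List.tail_cons, Bool.not_eq_eq_eq_not,
        Bool.not_true, beq_eq_false_iff_ne, ne_eq]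
      constructor
      · rintro ⟨hxr, hxne⟩
        have : x ∈ (b0 :: t).map Prod.fst := (hkmem x).mpr hxr
        simp only [List.map_cons, List.mem_cons] at this
        rcases this with rfl | hxt
        · exact absurd rfl hxne
        · exact hxt
      · intro hxt
        refine ⟨(hkmem x).mp (by simp [hxt]), ?_⟩
        intro he
        exact hknd.1 (he ▸ hxt)
  · -- two pair: hi/lo are the first two group ranks, the kickers agree
    match hbcc : bc with
    | [] =>
      simp [PySem.List.pyGetD, PySem.List.pyGet?] at h9
    | [b0] =>
      simp [PySem.List.pyGetD, PySem.List.pyGet?, PySem.List.pyIdx?] at h9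
    | b0 :: b1 :: t =>
      have hb01 : PySem.List.pyGetD (b0 :: b1 :: t) 0 ((0 : Int), (0 : Int)) = b0 :=
        PySem.List.pyGetD_zero_cons _ _ _
      have hb11 : PySem.List.pyGetD (b0 :: b1 :: t) 1 ((0 : Int), (0 : Int)) = b1 := by
        simp [PySem.List.pyGetD_ofNat']
      rw [hb01, hb11] at h9 ⊢
      have hpair : List.Pairwise (fun a b => lexRC a b = false) (b0 :: b1 :: t) := by
        have := bycount_pairwise ((PySem.Set.ofList rs).map
          (fun k => (k, (List.count k rs : Int))))
        rw [← hbc] at this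
        exact this
      have hle : b1.1 ≤ b0.1 := by
        have hx := (List.pairwise_cons.mp hpair).1 b1 (by simp)
        have h9' := h9
        simp only [Bool.and_eq_true, beq_iff_eq] at h9'
        simp only [lexRC, Bool.or_eq_false_iff, Bool.and_eq_false_iff] at hx
        simp only [decide_eq_false_iff_not, Bool.not_eq_false', decide_eq_true_iff] at hx
        omega
      rw [max_eq_left hle, min_eq_right hle]
      simp only [List.map_cons, List.nodup_cons, List.mem_cons] at hknd
      simp only [List.cons.injEq, and_true, true_and]
      apply max_getD_congr
      intro x
      simp only [List.mem_filter, List.drop_succ_cons, List.drop_zero,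
        Bool.not_eq_eq_eq_not, Bool.not_true, Bool.or_eq_false_iff,
        beq_eq_false_iff_ne, ne_eq]
      constructor
      · rintro ⟨hxr, hxne0, hxne1⟩
        have : x ∈ (b0 :: b1 :: t).map Prod.fst := (hkmem x).mpr hxr
        simp only [List.map_cons, List.mem_cons] at this
        rcases this with rfl | rfl | hxt
        · exact absurd rfl hxne0
        · exact absurd rfl hxne1
        · exact hxt
      · intro hxt
        refine ⟨(hkmem x).mp (by
          simp only [List.map_cons, List.mem_cons]
          exact Or.inr (Or.inr hxt)), ?_, ?_⟩
        · intro he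
          exact hknd.1 (Or.inr (he ▸ hxt))
        · intro he
          exact hknd.2.1 (he ▸ hxt)


theorem foldl_add_const (x : Int) : ∀ (xs : List Int), (∀ y ∈ xs, y = x) →
    xs.foldl PySem.Set.add [x] = [x]
  | [], _ => rfl
  | y :: xs, h => by
    have hy : y = x := h y (by simp)
    rw [List.foldl_cons, hy,
      show PySem.Set.add [x] x = [x] by simp [PySem.Set.add, PySem.Set.contains]]
    exact foldl_add_const x xs (fun z hz => h z (by simp [hz]))

theorem flush_eq (cards5 : List (Int × Int)) (h : cards5 ≠ []) :
    (PySem.Set.len (PySem.Set.ofList (cards5.map (fun c => c.2))) == 1) =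
    (decide (0 < cards5.length) &&
      cards5.all (fun c => c.2 == (PySem.List.pyGetD cards5 0 ((0 : Int), (0 : Int))).2)) := by
  match cards5 with
  | [] => exact absurd rfl h
  | c0 :: rest =>
    simp only [List.map_cons, PySem.List.pyGetD_zero_cons, List.all_cons, beq_self_eq_true,
      Bool.true_and, List.length_cons]
    rw [Bool.eq_iff_iff]
    constructor
    · intro hlen
      rw [Bool.and_eq_true]
      refine ⟨decide_eq_true (Nat.succ_pos _), ?_⟩
      have h1 : (PySem.Set.ofList (c0.2 :: rest.map (fun c => c.2))).length = 1 := by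
        simp [PySem.Set.len, beq_iff_eq] at hlen
        omega
      obtain ⟨z, hz⟩ : ∃ z, PySem.Set.ofList (c0.2 :: rest.map (fun c => c.2)) = [z] := by
        match hm : PySem.Set.ofList (c0.2 :: rest.map (fun c => c.2)) with
        | [z] => exact ⟨z, hm⟩
        | [] | _ :: _ :: _ => rw [hm] at h1; simp at h1
      have hx : c0.2 = z := by
        have : c0.2 ∈ PySem.Set.ofList (c0.2 :: rest.map (fun c => c.2)) := by
          rw [PySem.Set.mem_ofList]; simp
        rw [hz] at this; simpa using this
      simp only [List.all_eq_true, beq_iff_eq]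
      intro c hc
      have : c.2 ∈ PySem.Set.ofList (c0.2 :: rest.map (fun c => c.2)) := by
        rw [PySem.Set.mem_ofList]
        simp only [List.mem_cons, List.mem_map]
        exact Or.inr ⟨c, hc, rfl⟩
      rw [hz] at this
      simp only [List.mem_singleton] at this
      rw [this, hx]
    · intro hall
      rw [Bool.and_eq_true] at hall
      replace hall := hall.2
      have : PySem.Set.ofList (c0.2 :: rest.map (fun c => c.2)) = [c0.2] := by
        rw [PySem.Set.ofList_eq_foldl, List.foldl_cons]
        have : PySem.Set.add [] c0.2 = [c0.2] := by simp [PySem.Set.add, PySem.Set.contains]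
        rw [this]
        apply foldl_add_const
        intro y hy
        simp only [List.mem_map] at hy
        obtain ⟨c, hc, rfl⟩ := hy
        simp only [List.all_eq_true, beq_iff_eq] at hall
        exact hall c hc
      rw [this]
      simp [PySem.Set.len]

theorem main (cards5 : List (Int × Int)) (hne : cards5 ≠ []) :
    hand_rank_5 cards5 = hand_rank_5_alt cards5 := by
  unfold hand_rank_5 hand_rank_5_alt
  rw [flush_eq cards5 hne]
  exact core_eq _ _ (PySem.List.sorted_pairwise_rev (cards5.map (fun c => c.1)) (fun x => x))

-- ===== VERDICT (by name: the statement is the Claim_ definition above) =====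
theorem hand_rank_5_spec : Claim_equal_hand_rank_5 := by
  intro cards5 _ hpre
  unfold Spec_hand_rank_5
  exact main cards5 hpre.1
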